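-- pv_equiv track=rewrite | github.com/odanado/rng-api | src/id_seed.py | gen_candidate
-- ===== SOURCE A (Python) =====
-- def convert(n, add):
--     return (n + add + 17) % 17
--
-- def replace(needles, idx, val):
--     ret = list(needles)
--     ret[idx] = val
--     return ret
--
-- def gen_candidate_rec(pos, needles, fuzzy_pos, res):
--     if len(needles) == pos:
--         res.append(needles)
--         return
--
--     if pos in fuzzy_pos:
--         for add in range(2):
--             val = convert(needles[pos], add)
--             gen_candidate_rec(
--                 pos + 1, replace(needles, pos, val), fuzzy_pos, res)
--     else:
--         gen_candidate_rec(pos + 1, needles, fuzzy_pos, res)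
--
-- def gen_candidate(needles):
--     num_needle = len(needles)
--
--     fuzzy_pos = set()
--
--     for i in range(num_needle):
--         if needles[i][-1] == '?':
--             fuzzy_pos.add(i)
--             needles[i] = needles[i][:-1]
--
--     needles = list(map(int, needles))
--
--     res = []
--     gen_candidate_rec(0, needles, fuzzy_pos, res)
--     return res
-- ===== SOURCE B (Python) =====
-- def convert(n, add):
--     return (n + add + 17) % 17
--
--
-- def gen_candidate(needles):
--     # Same parsing prologue as the original, including the in-place
--     # stripping of '?' from fuzzy needles; but instead of recursing,
--     # build per-position choice lists and fold a cartesian product.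
--     choices = []
--     for i in range(len(needles)):
--         s = needles[i]
--         if s[-1] == '?':
--             needles[i] = s[:-1]
--             n = int(needles[i])
--             choices.append([convert(n, 0), convert(n, 1)])
--         else:
--             choices.append([int(s)])
--     combos = [[]]
--     for ch in choices:
--         combos = [c + [v] for c in combos for v in ch]
--     return combos
-- ===== Notes on version B (the rewrite author's own statement) =====
-- stated objective: alternative
-- what changed: Replaces the recursive enumerator (gen_candidate_rec with per-call list copies via replace) by a single parsing pass that builds per-position choice lists and a left fold computing their cartesian product.
import Mathlib
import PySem

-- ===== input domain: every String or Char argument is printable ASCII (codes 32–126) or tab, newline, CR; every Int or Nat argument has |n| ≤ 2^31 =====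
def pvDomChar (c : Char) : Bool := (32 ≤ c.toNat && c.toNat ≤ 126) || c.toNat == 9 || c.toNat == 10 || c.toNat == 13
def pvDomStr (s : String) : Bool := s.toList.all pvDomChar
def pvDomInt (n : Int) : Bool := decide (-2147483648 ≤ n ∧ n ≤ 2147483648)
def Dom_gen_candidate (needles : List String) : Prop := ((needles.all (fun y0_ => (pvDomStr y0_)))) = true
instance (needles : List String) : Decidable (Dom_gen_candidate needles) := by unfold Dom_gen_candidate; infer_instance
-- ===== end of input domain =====

-- B replaces A's recursive enumeration (with list copying via replace) by one parsing pass that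
-- builds per-position choice lists and a left fold taking their cartesian product; same return
-- value, and the same in-place '?'-stripping mutation of the argument list (return value proved here).


-- ===== PORT A =====
-- shared module helper: convert(n, add) = (n + add + 17) % 17
def convert (n add : Int) : Int := PySem.Int.mod (n + add + 17) 17

-- replace(needles, idx, val): copy with ret[idx] = val (idx in range at every call site)
def pyreplace (needles : List Int) (idx : Int) (val : Int) : List Int :=
  PySem.List.pySetD needles idx val

-- gen_candidate_rec; fuel only makes the recursion total (every call has fuel ≥ len - pos)
def gen_candidate_rec : Int → List Int → PySem.Set Int → List (List Int) → Nat → List (List Int)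
  | pos, needles, fuzzy_pos, res, fuel =>
    if (needles.length : Int) = pos then res ++ [needles]
    else match fuel with
      | 0 => res   -- unreachable under the call-site fuel
      | fuel + 1 =>
        if PySem.Set.contains fuzzy_pos pos then
          -- for add in range(2): val = convert(needles[pos], add); recurse on replace(...)
          let v0 := convert (PySem.List.pyGetD needles pos 0) 0
          let r0 := gen_candidate_rec (pos + 1) (pyreplace needles pos v0) fuzzy_pos res fuel
          let v1 := convert (PySem.List.pyGetD needles pos 0) 1
          gen_candidate_rec (pos + 1) (pyreplace needles pos v1) fuzzy_pos r0 fuel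
        else gen_candidate_rec (pos + 1) needles fuzzy_pos res fuel

def gen_candidate (needles : List String) : List (List Int) :=
  let num_needle := needles.length
  -- for i in range(num_needle): if needles[i][-1] == '?': fuzzy_pos.add(i); needles[i] = needles[i][:-1]
  -- (needles[i][-1] raises IndexError on "": those inputs are outside Pre_; the '== some ?' test is then false)
  let st := (PySem.List.pyRange 0 num_needle 1).foldl
    (fun (st : PySem.Set Int × List String) i =>
      let s := PySem.List.pyGetD st.2 i ""
      if PySem.Str.pyGet? s (-1) == some '?' then
        (PySem.Set.add st.1 i, PySem.List.pySetD st.2 i (PySem.Str.slice s none (some (-1))))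
      else st)
    (PySem.Set.empty, needles)
  -- needles = list(map(int, needles)); int() raising ValueError is outside Pre_ (getD 0 is then unreached)
  let ints := st.2.map (fun s => (PySem.Int.ofStr? s).getD 0)
  gen_candidate_rec 0 ints st.1 [] ints.length

-- ===== PORT B =====
def gen_candidate_alt (needles : List String) : List (List Int) :=
  -- one pass: strip '?' in place and collect the per-position choice list
  let st := (PySem.List.pyRange 0 needles.length 1).foldl
    (fun (st : List (List Int) × List String) i =>
      let s := PySem.List.pyGetD st.2 i ""
      if PySem.Str.pyGet? s (-1) == some '?' then
        let ns := PySem.List.pySetD st.2 i (PySem.Str.slice s none (some (-1)))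
        let n := (PySem.Int.ofStr? (PySem.List.pyGetD ns i "")).getD 0
        (st.1 ++ [[convert n 0, convert n 1]], ns)
      else (st.1 ++ [[(PySem.Int.ofStr? s).getD 0]], st.2))
    ([], needles)
  -- combos = [[]]; for ch in choices: combos = [c + [v] for c in combos for v in ch]
  st.1.foldl (fun combos ch => combos.flatMap (fun c => ch.map (fun v => c ++ [v]))) [[]]

-- ===== PRECONDITION & SPEC =====
-- Pre_ excludes exactly the inputs where Python A raises: an empty needle ("" → IndexError on s[-1])
-- and a needle whose string (after stripping a trailing '?') is not an int literal (ValueError in int()).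
def Pre_gen_candidate (needles : List String) : Prop :=
  ∀ s ∈ needles, s.toList ≠ [] ∧
    (PySem.Int.ofChars? (if s.toList.getLast? = some '?' then s.toList.dropLast else s.toList)).isSome = true
instance (needles : List String) : Decidable (Pre_gen_candidate needles) := by
  unfold Pre_gen_candidate; infer_instance

def pvWitness_gen_candidate : List String := ["3?", "-10", "+5?"]

def Spec_gen_candidate (needles : List String) (out : List (List Int)) : Prop := out = gen_candidate_alt needles
instance (needles : List String) (out : List (List Int)) : Decidable (Spec_gen_candidate needles out) := by unfold Spec_gen_candidate; infer_instance

-- ===== CLAIM (what is proved, stated in full; the proofs are below) =====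
def Claim_equal_gen_candidate : Prop := ∀ (needles : List String), Dom_gen_candidate needles → Pre_gen_candidate needles → Spec_gen_candidate needles (gen_candidate needles)

-- ===== LEMMAS AND PROOFS =====

-- abbreviations for the per-element parse both ports perform
def lastQ (s : String) : Bool := PySem.Str.pyGet? s (-1) == some '?'
def stripQ (s : String) : String := if lastQ s then PySem.Str.slice s none (some (-1)) else s
def valOf (s : String) : Int := (PySem.Int.ofStr? (stripQ s)).getD 0
def choiceOf (s : String) : List Int :=
  if lastQ s then [convert (valOf s) 0, convert (valOf s) 1] else [valOf s]

-- right-nested cartesian product (first position slowest-varying)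
def prodR : List (List Int) → List (List Int)
  | [] => [[]]
  | ch :: rest => ch.flatMap (fun v => (prodR rest).map (v :: ·))

-- fuzzy indices of a suffix starting at absolute index k, in order
def fuzzyIdx : List String → Nat → List Int
  | [], _ => []
  | s :: rest, k => (if lastQ s then [(k : Int)] else []) ++ fuzzyIdx rest (k + 1)

-- choice lists of an Int suffix starting at absolute index k
def chList (fuzzy : PySem.Set Int) : List Int → Nat → List (List Int)
  | [], _ => []
  | x :: rest, k =>
      (if PySem.Set.contains fuzzy (k : Int) then [convert x 0, convert x 1] else [x]) ::
        chList fuzzy rest (k + 1)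

theorem take_succ_eq (l : List Int) (p : Nat) (h : p < l.length) :
    l.take (p+1) = l.take p ++ [l[p]] := by
  rw [List.take_add_one, List.getElem?_eq_getElem h]; rfl

theorem set_take_succ (l : List Int) (p : Nat) (v : Int) (h : p < l.length) :
    (l.set p v).take (p+1) = l.take p ++ [v] := by
  rw [List.take_set, take_succ_eq l p h, List.set_append]
  simp [List.length_take, Nat.min_eq_left h.le]

theorem fuzzyIdx_lt : ∀ (suf : List String) (k : Nat) (j : Int), j ∈ fuzzyIdx suf k → (k : Int) ≤ j := by
  intro suf
  induction suf with
  | nil => intro k j h; simp [fuzzyIdx] at h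
  | cons s rest ih =>
    intro k j h
    simp only [fuzzyIdx, List.mem_append] at h
    rcases h with h | h
    · split at h <;> simp at h; omega
    · have := ih (k+1) j h; push_cast at this ⊢; omega

theorem contains_fuzzyIdx : ∀ (suf : List String) (k j : Nat), j < suf.length →
    PySem.Set.contains (fuzzyIdx suf k) ((k + j : Nat) : Int) = lastQ (suf.getD j "") := by
  intro suf
  induction suf with
  | nil => intro k j h; simp at h
  | cons s rest ih =>
    intro k j hj
    cases j with
    | zero =>
      by_cases hq : lastQ s
      · simp [fuzzyIdx, hq, PySem.Set.contains]
      · have hnm : ((k : Nat) : Int) ∉ fuzzyIdx rest (k+1) := by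
          intro hm
          have := fuzzyIdx_lt rest (k+1) _ hm
          push_cast at this; omega
        simp [fuzzyIdx, hq, PySem.Set.contains, hnm]
    | succ j =>
      have h2 := ih (k+1) j (by simpa using Nat.lt_of_succ_lt_succ hj)
      have hx : ((k + (j+1) : Nat) : Int) = (((k+1) + j : Nat) : Int) := by push_cast; ring
      have hnm : (((k+1) + j : Nat) : Int) ∉ (if lastQ s then [(k : Int)] else []) := by
        split
        · simp
          omega
        · simp
      simp only [fuzzyIdx, hx, List.getD_cons_succ]
      simp only [PySem.Set.contains, List.contains_append] at h2 ⊢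
      have hif : List.contains (if lastQ s then [(k : Int)] else []) (((k+1) + j : Nat) : Int) = false := by
        simpa using hnm
      rw [hif, Bool.false_or, h2]

-- A's parsing loop, generalised over the processed prefix
theorem parseA : ∀ (suf pre : List String) (fz : PySem.Set Int),
    (∀ j ∈ fz, j < (pre.length : Int)) →
    (PySem.List.pyRange (pre.length : Int) ((pre.length : Int) + (suf.length : Int)) 1).foldl
      (fun (st : PySem.Set Int × List String) i =>
        let s := PySem.List.pyGetD st.2 i ""
        if PySem.Str.pyGet? s (-1) == some '?' then
          (PySem.Set.add st.1 i, PySem.List.pySetD st.2 i (PySem.Str.slice s none (some (-1))))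
        else st)
      (fz, pre ++ suf)
    = (fz ++ fuzzyIdx suf pre.length, pre ++ suf.map stripQ) := by
  intro suf
  induction suf with
  | nil =>
    intro pre fz _
    simp [fuzzyIdx, PySem.List.pyRange]
  | cons s rest ih =>
    intro pre fz hfz
    have hcons : PySem.List.pyRange (pre.length : Int) ((pre.length : Int) + ((s :: rest).length : Int)) 1
        = (pre.length : Int) :: PySem.List.pyRange ((pre.length : Int) + 1) ((pre.length : Int) + ((s :: rest).length : Int)) 1 := by
      rw [PySem.List.pyRange_one_cons]
      simp only [List.length_cons]
      push_cast
      omega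
    rw [hcons, List.foldl_cons]
    have hget : PySem.List.pyGetD (pre ++ s :: rest) ((pre.length : Int)) "" = s := by
      simp [PySem.List.pyGetD_natCast, List.getD]
    by_cases hq : lastQ s
    · have hq' : (PySem.Str.pyGet? s (-1) == some '?') = true := hq
      have hadd : PySem.Set.add fz ((pre.length : Int)) = fz ++ [(pre.length : Int)] := by
        have : ((pre.length : Int)) ∉ fz := fun hm => absurd (hfz _ hm) (by omega)
        simp [PySem.Set.add, PySem.Set.contains, this]
      have hset : PySem.List.pySetD (pre ++ s :: rest) ((pre.length : Int)) (PySem.Str.slice s none (some (-1)))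
          = (pre ++ [stripQ s]) ++ rest := by
        simp [PySem.List.pySetD_natCast, stripQ, hq]
      simp only [hget, hq', if_pos, hadd, hset]
      have hlen : ((pre.length : Int) + 1) = (((pre ++ [stripQ s]).length : Nat) : Int) := by
        simp [List.length_append]
      have hlen2 : ((pre.length : Int) + ((s :: rest).length : Int))
          = (((pre ++ [stripQ s]).length : Nat) : Int) + ((rest.length : Nat) : Int) := by
        simp [List.length_append]; ring
      rw [hlen, hlen2, ih (pre ++ [stripQ s]) (fz ++ [(pre.length : Int)])
        (by intro j hj
            have hL : (((pre ++ [stripQ s]).length : Nat) : Int) = (pre.length : Int) + 1 := by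
              simp [List.length_append]
            rw [hL]
            rcases List.mem_append.1 hj with h | h
            · have := hfz _ h; omega
            · simp at h; omega)]
      simp [fuzzyIdx, hq, stripQ]
    · have hq' : (PySem.Str.pyGet? s (-1) == some '?') = false := by
        simpa [lastQ] using hq
      simp only [hget, hq', Bool.false_eq_true, if_neg, not_false_iff]
      have hsplit : pre ++ s :: rest = (pre ++ [s]) ++ rest := by simp
      have hlen : ((pre.length : Int) + 1) = (((pre ++ [s]).length : Nat) : Int) := by
        simp [List.length_append]
      have hlen2 : ((pre.length : Int) + ((s :: rest).length : Int))
          = (((pre ++ [s]).length : Nat) : Int) + ((rest.length : Nat) : Int) := by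
        simp [List.length_append]; ring
      rw [hsplit, hlen, hlen2, ih (pre ++ [s]) fz
        (by intro j hj
            have hL : (((pre ++ [s]).length : Nat) : Int) = (pre.length : Int) + 1 := by
              simp [List.length_append]
            have := hfz _ hj; rw [hL]; omega)]
      simp [fuzzyIdx, hq, stripQ]

-- B's parsing loop, generalised over the processed prefix
theorem parseB : ∀ (suf pre : List String) (acc : List (List Int)),
    (PySem.List.pyRange (pre.length : Int) ((pre.length : Int) + (suf.length : Int)) 1).foldl
      (fun (st : List (List Int) × List String) i =>
        let s := PySem.List.pyGetD st.2 i ""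
        if PySem.Str.pyGet? s (-1) == some '?' then
          let ns := PySem.List.pySetD st.2 i (PySem.Str.slice s none (some (-1)))
          let n := (PySem.Int.ofStr? (PySem.List.pyGetD ns i "")).getD 0
          (st.1 ++ [[convert n 0, convert n 1]], ns)
        else (st.1 ++ [[(PySem.Int.ofStr? s).getD 0]], st.2))
      (acc, pre ++ suf)
    = (acc ++ suf.map choiceOf, pre ++ suf.map stripQ) := by
  intro suf
  induction suf with
  | nil =>
    intro pre acc
    simp [PySem.List.pyRange]
  | cons s rest ih =>
    intro pre acc
    have hcons : PySem.List.pyRange (pre.length : Int) ((pre.length : Int) + ((s :: rest).length : Int)) 1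
        = (pre.length : Int) :: PySem.List.pyRange ((pre.length : Int) + 1) ((pre.length : Int) + ((s :: rest).length : Int)) 1 := by
      rw [PySem.List.pyRange_one_cons]
      simp only [List.length_cons]
      push_cast
      omega
    rw [hcons, List.foldl_cons]
    have hget : PySem.List.pyGetD (pre ++ s :: rest) ((pre.length : Int)) "" = s := by
      simp [PySem.List.pyGetD_natCast, List.getD]
    by_cases hq : lastQ s
    · have hq' : (PySem.Str.pyGet? s (-1) == some '?') = true := hq
      have hset : PySem.List.pySetD (pre ++ s :: rest) ((pre.length : Int)) (PySem.Str.slice s none (some (-1)))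
          = (pre ++ [stripQ s]) ++ rest := by
        simp [PySem.List.pySetD_natCast, stripQ, hq]
      have hget2 : PySem.List.pyGetD ((pre ++ [stripQ s]) ++ rest) ((pre.length : Int)) "" = stripQ s := by
        simp [PySem.List.pyGetD_natCast, List.getD]
      simp only [hget, hq', if_pos, hset, hget2]
      have hlen : ((pre.length : Int) + 1) = (((pre ++ [stripQ s]).length : Nat) : Int) := by
        simp [List.length_append]
      have hlen2 : ((pre.length : Int) + ((s :: rest).length : Int))
          = (((pre ++ [stripQ s]).length : Nat) : Int) + ((rest.length : Nat) : Int) := by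
        simp [List.length_append]; ring
      rw [hlen, hlen2, ih (pre ++ [stripQ s])]
      simp [choiceOf, valOf, hq, stripQ]
    · have hq' : (PySem.Str.pyGet? s (-1) == some '?') = false := by
        simpa [lastQ] using hq
      simp only [hget, hq', Bool.false_eq_true, if_neg, not_false_iff]
      have hsplit : pre ++ s :: rest = (pre ++ [s]) ++ rest := by simp
      have hlen : ((pre.length : Int) + 1) = (((pre ++ [s]).length : Nat) : Int) := by
        simp [List.length_append]
      have hlen2 : ((pre.length : Int) + ((s :: rest).length : Int))
          = (((pre ++ [s]).length : Nat) : Int) + ((rest.length : Nat) : Int) := by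
        simp [List.length_append]; ring
      rw [hsplit, hlen, hlen2, ih (pre ++ [s])]
      simp [choiceOf, valOf, hq, stripQ]

-- B's product fold
theorem foldl_product : ∀ (L : List (List Int)) (acc : List (List Int)),
    L.foldl (fun combos ch => combos.flatMap (fun c => ch.map (fun v => c ++ [v]))) acc
    = acc.flatMap (fun c => (prodR L).map (c ++ ·)) := by
  intro L
  induction L with
  | nil => intro acc; simp [prodR]
  | cons ch rest ih =>
    intro acc
    rw [List.foldl_cons, ih]
    simp only [prodR, List.flatMap_assoc, List.map_flatMap, List.flatMap_map, List.map_map]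
    apply List.flatMap_congr
    intro c _
    apply List.flatMap_congr
    intro v _
    simp [Function.comp, List.append_assoc]


-- A's recursion computes the cartesian product of the remaining choice lists
theorem recA : ∀ (fuel : Nat) (p : Nat) (ints : List Int) (fuzzy : PySem.Set Int) (res : List (List Int)),
    ints.length - p ≤ fuel → p ≤ ints.length →
    gen_candidate_rec (p : Int) ints fuzzy res fuel
      = res ++ (prodR (chList fuzzy (ints.drop p) p)).map (fun suf => ints.take p ++ suf) := by
  intro fuel
  induction fuel with
  | zero =>
    intro p ints fuzzy res hf hp
    have hlen : ints.length = p := by omega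
    subst hlen
    unfold gen_candidate_rec
    simp [chList, prodR]
  | succ f ih =>
    intro p ints fuzzy res hf hp
    by_cases hlen : ints.length = p
    · subst hlen
      unfold gen_candidate_rec
      simp [chList, prodR]
    · have hplt : p < ints.length := by omega
      unfold gen_candidate_rec
      rw [if_neg (by exact_mod_cast hlen)]
      rw [List.drop_eq_getElem_cons hplt]
      have hget : PySem.List.pyGetD ints ((p : Nat) : Int) 0 = ints[p] := by
        simp [PySem.List.pyGetD_natCast, List.getD, List.getElem?_eq_getElem hplt]
      have hrep : ∀ v : Int, pyreplace ints ((p : Nat) : Int) v = ints.set p v := by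
        intro v; simp [pyreplace]
      have hcast : ((p : Nat) : Int) + 1 = (((p + 1) : Nat) : Int) := by push_cast; ring
      have hdropset : ∀ v : Int, (ints.set p v).drop (p+1) = ints.drop (p+1) := by
        intro v; rw [List.drop_set]; simp
      by_cases hfz : PySem.Set.contains fuzzy ((p : Nat) : Int)
      · simp only [hfz, if_pos, hget, hrep, hcast]
        rw [ih (p+1) (ints.set p (convert ints[p] 0)) fuzzy res
              (by simp [List.length_set]; omega) (by simp [List.length_set]; omega),
            ih (p+1) (ints.set p (convert ints[p] 1)) fuzzy _
              (by simp [List.length_set]; omega) (by simp [List.length_set]; omega)]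
        rw [hdropset, hdropset, set_take_succ _ _ _ hplt, set_take_succ _ _ _ hplt]
        simp only [chList, hfz, if_pos, prodR, List.flatMap_cons, List.flatMap_nil,
          List.append_nil, List.map_append, List.map_map]
        simp [Function.comp_def, List.append_assoc]
      · simp only [hfz, Bool.false_eq_true, if_neg, not_false_iff, hcast]
        rw [ih (p+1) ints fuzzy res (by omega) (by omega)]
        simp only [chList, hfz, Bool.false_eq_true, if_neg, not_false_iff, prodR,
          List.flatMap_cons, List.flatMap_nil, List.append_nil, List.map_map]
        refine congrArg (res ++ ·) (List.map_congr_left (fun a _ => ?_))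
        show List.take (p+1) ints ++ a = List.take p ints ++ ints[p] :: a
        rw [take_succ_eq ints p hplt, List.append_assoc]
        rfl


theorem chList_map_valOf : ∀ (orig suf : List String) (k : Nat),
    (∀ j, j < suf.length → PySem.Set.contains (fuzzyIdx orig 0) ((k + j : Nat) : Int) = lastQ (suf.getD j "")) →
    chList (fuzzyIdx orig 0) (suf.map valOf) k = suf.map choiceOf := by
  intro orig suf
  induction suf with
  | nil => intro k _; rfl
  | cons s rest ih =>
    intro k h
    have h0 := h 0 (by simp)
    simp only [List.map_cons, chList]
    rw [ih (k+1) (fun j hj => by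
      have := h (j+1) (by simpa using Nat.succ_lt_succ hj)
      simpa [Nat.add_comm, Nat.add_assoc, Nat.add_left_comm] using this)]
    simp only [Nat.add_zero, List.getD_cons_zero] at h0
    by_cases hq : lastQ s
    · have hm : ((k : Nat) : Int) ∈ fuzzyIdx orig 0 := by
        have : PySem.Set.contains (fuzzyIdx orig 0) ((k : Nat) : Int) = true := by rw [h0, hq]
        simpa [PySem.Set.contains] using this
      simp [choiceOf, hm, hq]
    · have hm : ((k : Nat) : Int) ∉ fuzzyIdx orig 0 := by
        have : PySem.Set.contains (fuzzyIdx orig 0) ((k : Nat) : Int) = false := by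
          rw [h0]; simpa using hq
        simpa [PySem.Set.contains] using this
      simp [choiceOf, hm, hq]

-- ===== VERDICT (by name: the statement is the Claim_ definition above) =====
theorem gen_candidate_spec : Claim_equal_gen_candidate := by
  intro needles _ _
  unfold Spec_gen_candidate
  show gen_candidate needles = gen_candidate_alt needles
  have hA := parseA needles [] [] (by intro j hj; simp at hj)
  have hB := parseB needles [] []
  simp only [List.length_nil, Nat.cast_zero, zero_add, List.nil_append] at hA hB
  simp only [gen_candidate, gen_candidate_alt, PySem.Set.empty]
  rw [hA, hB]
  have hmap : (needles.map stripQ).map (fun s => (PySem.Int.ofStr? s).getD 0)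
      = needles.map valOf := by
    simp [List.map_map, valOf, Function.comp_def]
  rw [hmap]
  have hrec := recA (needles.map valOf).length 0 (needles.map valOf)
      (fuzzyIdx needles 0) [] (by omega) (by omega)
  simp only [Nat.cast_zero, List.drop_zero, List.take_zero, List.nil_append] at hrec
  rw [hrec, chList_map_valOf needles needles 0
        (fun j hj => by simpa using contains_fuzzyIdx needles 0 j hj)]
  rw [foldl_product]
  simp
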